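-- pv_equiv track=rewrite | github.com/erickhangati/code-wars-challenges | reversed-array-digits.py | digitize
-- ===== SOURCE A (Python) =====
-- def digitize(n):
--     """
--     Converts a number to a reversed list.
--     :param n: type - int
--     :return: reversed list
--     """
--     if n < 0:
--         return
--
--     # Reverse number and convert to string
--     reversed_nums = str(n)[::-1]
--     reversed_list = []
--
--     # Loop string
--     for letter in reversed_nums:
--         reversed_list.append(int(letter))
--
--     return reversed_list
-- ===== SOURCE B (Python) =====
-- def digitize(n):
--     """Arithmetic digit extraction (mod/div) instead of string conversion."""
--     if n < 0:
--         return
--     if n == 0: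
--         return [0]
--     out = []
--     while n > 0:
--         out.append(n % 10)
--         n //= 10
--     return out
-- ===== Notes on version B (the rewrite author's own statement) =====
-- stated objective: alternative
-- what changed: B extracts the digits arithmetically with a while-loop taking remainder and floor-quotient by ten (least-significant first, so already reversed) instead of A's string conversion, slicing and per-character int() parsing.
import Mathlib
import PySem

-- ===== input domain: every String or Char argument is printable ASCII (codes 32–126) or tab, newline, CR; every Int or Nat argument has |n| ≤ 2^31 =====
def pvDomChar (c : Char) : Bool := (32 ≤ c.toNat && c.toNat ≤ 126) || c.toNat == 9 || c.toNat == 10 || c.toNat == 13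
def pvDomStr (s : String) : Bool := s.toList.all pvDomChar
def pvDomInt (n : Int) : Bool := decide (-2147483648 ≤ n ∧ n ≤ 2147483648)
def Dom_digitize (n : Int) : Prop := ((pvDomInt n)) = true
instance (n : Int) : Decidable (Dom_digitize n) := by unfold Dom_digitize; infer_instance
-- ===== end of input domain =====

-- B replaces A's str(n)[::-1] + per-character int() parsing by an arithmetic mod/div loop
-- (objective: alternative, genuinely different digit-extraction mechanism, same asymptotic cost).

-- ===== PORT A =====
-- str(n)[::-1] = (PySem.Int.toChars n).reverse (PySem.Str.slice?_none_none_neg_one);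
-- int(letter): every letter is a decimal digit of str(n) for n ≥ 0, so int() cannot raise and
-- (PySem.Int.ofChars? [letter]).getD 0 is exact here.
def digitize (n : Int) : Option (List Int) :=
  if n < 0 then none
  else
    some (((PySem.Int.toChars n).reverse).foldl
      (fun acc letter => acc ++ [(PySem.Int.ofChars? [letter]).getD 0]) [])

-- ===== PORT B =====
-- the `while n > 0` loop of Source B; at this point n > 0, so it runs on n.toNat
def digitizeAltLoop (m : Nat) : List Int :=
  if m = 0 then []
  else ((m : Int) % 10) :: digitizeAltLoop (m / 10)
decreasing_by exact Nat.div_lt_self (Nat.pos_of_ne_zero (by assumption)) (by norm_num)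

def digitize_alt (n : Int) : Option (List Int) :=
  if n < 0 then none
  else if n = 0 then some [0]
  else some (digitizeAltLoop n.toNat)

-- ===== PRECONDITION & SPEC =====
def Spec_digitize (n : Int) (out : Option (List Int)) : Prop := out = digitize_alt n
instance (n : Int) (out : Option (List Int)) : Decidable (Spec_digitize n out) := by
  unfold Spec_digitize; infer_instance

-- ===== CLAIM (what is proved, stated in full; the proofs are below) =====
def Claim_equal_digitize : Prop := ∀ (n : Int), Dom_digitize n → Spec_digitize n (digitize n)

-- ===== LEMMAS AND PROOFS =====

-- the foldl of A's loop is a map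
lemma foldl_snoc_eq_map (f : Char → Int) (l : List Char) (acc : List Int) :
    l.foldl (fun a c => a ++ [f c]) acc = acc ++ l.map f := by
  induction l generalizing acc with
  | nil => simp
  | cons c l ih => simp [List.foldl, ih]

-- int('<digit d>') = d for d < 10
lemma ofChars?_digitChar (d : Nat) (h : d < 10) :
    (PySem.Int.ofChars? [Nat.digitChar d]).getD 0 = Int.ofNat d := by
  interval_cases d <;> decide

-- Nat.toDigitsCore produces the base-10 digits, most significant first
lemma toDigitsCore_eq (f : Nat) : ∀ (m : Nat) (acc : List Char), 0 < m → m < 10 ^ f →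
    Nat.toDigitsCore 10 f m acc = ((Nat.digits 10 m).map Nat.digitChar).reverse ++ acc := by
  induction f with
  | zero => intro m acc hm hlt; omega
  | succ f ih =>
    intro m acc hm hlt
    rw [Nat.toDigitsCore]
    by_cases h : m / 10 = 0
    · have hm10 : m < 10 := by omega
      rw [Nat.digits_def' (by norm_num : (1:Nat) < 10) hm]
      simp [h, Nat.mod_eq_of_lt hm10]
    · simp only [h, if_false]
      rw [ih (m / 10) _ (Nat.pos_of_ne_zero h)
        (Nat.div_lt_of_lt_mul (by rwa [← pow_succ'] ))]
      rw [Nat.digits_def' (by norm_num : (1:Nat) < 10) hm]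
      simp

lemma toDigits_eq (m : Nat) (hm : 0 < m) :
    Nat.toDigits 10 m = ((Nat.digits 10 m).map Nat.digitChar).reverse := by
  have h : m < 10 ^ (m + 1) := by
    calc m < 10 ^ m := Nat.lt_pow_self (by norm_num)
    _ ≤ 10 ^ (m + 1) := Nat.pow_le_pow_right (by norm_num) (Nat.le_succ m)
  simpa using toDigitsCore_eq (m + 1) m [] hm h

-- B's loop computes Nat.digits 10, cast to Int
lemma digitizeAltLoop_eq (m : Nat) :
    digitizeAltLoop m = (Nat.digits 10 m).map Int.ofNat := by
  induction m using Nat.strong_induction_on with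
  | _ m ih =>
    rw [digitizeAltLoop]
    by_cases h : m = 0
    · simp [h]
    · rw [if_neg h, ih (m / 10) (Nat.div_lt_self (Nat.pos_of_ne_zero h) (by norm_num)),
        Nat.digits_def' (by norm_num : (1:Nat) < 10) (Nat.pos_of_ne_zero h)]
      simp [Int.ofNat_eq_natCast]

-- ===== VERDICT (by name: the statement is the Claim_ definition above) =====
theorem digitize_spec : Claim_equal_digitize := by
  intro n _
  unfold Spec_digitize digitize digitize_alt
  by_cases hneg : n < 0
  · simp [hneg]
  · rw [if_neg hneg, if_neg hneg]
    by_cases h0 : n = 0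
    · subst h0; decide
    · rw [if_neg h0]
      have hpos : 0 < n.toNat := by omega
      have htc : PySem.Int.toChars n = Nat.toDigits 10 n.toNat := by
        unfold PySem.Int.toChars; rw [if_neg hneg]
      rw [htc, toDigits_eq n.toNat hpos, List.reverse_reverse,
        foldl_snoc_eq_map, digitizeAltLoop_eq]
      refine congrArg some ?_
      rw [List.nil_append, List.map_map]
      exact List.map_congr_left
        (fun d hd => ofChars?_digitChar d (Nat.digits_lt_base (by norm_num) hd))
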